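-- pv_equiv track=rewrite | github.com/TheRealCubeAD/DSA | FuzzySchafkopf1.1.py | unterschiedlicheSpatzen
-- ===== SOURCE A (Python) =====
-- def unterschiedlicheSpatzen(Blatt):
--     for k in range(0, 3):
--         test = False
--         for j in range(0, 8):
--             if [5 * k, 5 * k + 1, 5 * k + 2].count(Blatt[j]) > 0:
--                 test = True
--         if test == False:
--             return False
--     return True
-- ===== SOURCE B (Python) =====
-- def unterschiedlicheSpatzen(Blatt):
--     s0 = s1 = s2 = False
--     for j in range(8):
--         g, r = divmod(Blatt[j], 5)
--         if r < 3:
--             if g == 0: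
--                 s0 = True
--             elif g == 1:
--                 s1 = True
--             elif g == 2:
--                 s2 = True
--     return s0 and s1 and s2
-- ===== Notes on version B (the rewrite author's own statement) =====
-- stated objective: alternative
-- what changed: A scans all 8 cards once per group against a 3-element list; B makes a single pass over the cards, classifying each card arithmetically by divmod(card,5) into its group and setting one of three boolean flags, then returns the conjunction of the flags.
import Mathlib
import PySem

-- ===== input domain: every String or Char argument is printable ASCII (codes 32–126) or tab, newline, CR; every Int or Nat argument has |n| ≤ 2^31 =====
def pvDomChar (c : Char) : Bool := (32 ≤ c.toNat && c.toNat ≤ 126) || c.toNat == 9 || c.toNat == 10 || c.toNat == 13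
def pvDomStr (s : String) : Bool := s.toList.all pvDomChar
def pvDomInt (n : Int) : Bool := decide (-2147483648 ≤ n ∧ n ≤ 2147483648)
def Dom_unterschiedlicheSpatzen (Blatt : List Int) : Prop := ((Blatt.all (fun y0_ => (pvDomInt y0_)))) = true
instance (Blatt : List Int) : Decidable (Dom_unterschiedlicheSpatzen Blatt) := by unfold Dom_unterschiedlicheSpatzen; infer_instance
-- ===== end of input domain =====

-- B inverts A's traversal: instead of scanning all 8 cards once per group, B makes a single
-- pass over the cards, classifying each by divmod(card,5) and setting one of three flags
-- (alternative decomposition; return value only).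

-- ===== PORT A =====
-- outer 'for k in range(0,3)' loop with early 'return False'
def pvAOuter (Blatt : List Int) : List Int → Bool
  | [] => true
  | k :: ks =>
      -- inner 'for j in range(0,8)' accumulating 'test'
      let test := (PySem.List.pyRange 0 8 1).foldl
        (fun test j =>
          if PySem.List.count [5 * k, 5 * k + 1, 5 * k + 2] (PySem.List.pyGetD Blatt j 0) > 0
          then true else test)
        false
      if test = false then false else pvAOuter Blatt ks

def unterschiedlicheSpatzen (Blatt : List Int) : Bool :=
  pvAOuter Blatt (PySem.List.pyRange 0 3 1)

-- ===== PORT B =====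
-- one step of B's 'for j in range(8)' loop over the flag triple (s0, s1, s2)
def pvBStep (Blatt : List Int) (s : Bool × Bool × Bool) (j : Int) : Bool × Bool × Bool :=
  let g := PySem.Int.floordiv (PySem.List.pyGetD Blatt j 0) 5
  let r := PySem.Int.mod (PySem.List.pyGetD Blatt j 0) 5
  if r < 3 then
    if g = 0 then (true, s.2.1, s.2.2)
    else if g = 1 then (s.1, true, s.2.2)
    else if g = 2 then (s.1, s.2.1, true)
    else s
  else s

def unterschiedlicheSpatzen_alt (Blatt : List Int) : Bool :=
  let s := (PySem.List.pyRange 0 8 1).foldl (pvBStep Blatt) (false, false, false)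
  s.1 && s.2.1 && s.2.2

-- ===== PRECONDITION & SPEC =====
-- Both Pythons index Blatt[0..7], raising IndexError on shorter hands; Pre_ is exactly that.
def Pre_unterschiedlicheSpatzen (Blatt : List Int) : Prop := 8 ≤ Blatt.length
instance (Blatt : List Int) : Decidable (Pre_unterschiedlicheSpatzen Blatt) := by unfold Pre_unterschiedlicheSpatzen; infer_instance
def pvWitness_unterschiedlicheSpatzen : List Int := [0, 1, 5, 6, 10, 11, 3, 7]

def Spec_unterschiedlicheSpatzen (Blatt : List Int) (out : Bool) : Prop := out = unterschiedlicheSpatzen_alt Blatt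
instance (Blatt : List Int) (out : Bool) : Decidable (Spec_unterschiedlicheSpatzen Blatt out) := by unfold Spec_unterschiedlicheSpatzen; infer_instance

-- ===== CLAIM (what is proved, stated in full; the proofs are below) =====
def Claim_equal_unterschiedlicheSpatzen : Prop := ∀ (Blatt : List Int), Dom_unterschiedlicheSpatzen Blatt → Pre_unterschiedlicheSpatzen Blatt → Spec_unterschiedlicheSpatzen Blatt (unterschiedlicheSpatzen Blatt)

-- ===== LEMMAS AND PROOFS =====

-- the generic group-membership condition B tests for card c and group k
def pvCond (c k : Int) : Bool :=
  decide (PySem.Int.mod c 5 < 3 ∧ PySem.Int.floordiv c 5 = k)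

-- arithmetic bridge: for any k, c ∈ {5k, 5k+1, 5k+2} ↔ divmod classifies c into group k
theorem pv_cond_iff (c k : Int) :
    pvCond c k = true ↔ (c = 5 * k ∨ c = 5 * k + 1 ∨ c = 5 * k + 2) := by
  have hd := PySem.Int.floordiv_mul_add_mod c 5
  have h0 := PySem.Int.mod_nonneg c (b := 5) (by norm_num)
  have h5 := PySem.Int.mod_lt c (b := 5) (by norm_num)
  simp only [pvCond, decide_eq_true_eq]
  constructor
  · rintro ⟨hr, hg⟩; omega
  · intro h; omega

-- A's inner fold is an 'any'
theorem pv_foldl_if_any {α : Type} (P : α → Prop) [DecidablePred P] (l : List α) (b : Bool) :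
    l.foldl (fun t x => if P x then true else t) b = (b || l.any (fun x => decide (P x))) := by
  induction l generalizing b with
  | nil => simp
  | cons x xs ih =>
      simp only [List.foldl, List.any_cons]
      by_cases h : P x
      · rw [if_pos h, ih]; simp [h]
      · rw [if_neg h, ih]; simp [h]

-- each flag of B's fold is its initial value OR'd with an 'any' over the cards
theorem pv_fold_flags (Blatt : List Int) (l : List Int) (s : Bool × Bool × Bool) :
    l.foldl (pvBStep Blatt) s
      = (s.1 || l.any (fun j => pvCond (PySem.List.pyGetD Blatt j 0) 0),
         s.2.1 || l.any (fun j => pvCond (PySem.List.pyGetD Blatt j 0) 1),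
         s.2.2 || l.any (fun j => pvCond (PySem.List.pyGetD Blatt j 0) 2)) := by
  induction l generalizing s with
  | nil => simp
  | cons j js ih =>
      obtain ⟨a, b, c⟩ := s
      simp only [List.foldl, List.any_cons, ih, pvBStep]
      split_ifs with hr h0 h1 h2
      · simp only [PySem.Int.mod, PySem.Int.floordiv] at hr h0
        simp [pvCond, PySem.Int.mod, PySem.Int.floordiv, hr, h0]
      · simp only [PySem.Int.mod, PySem.Int.floordiv] at hr h0 h1
        simp [pvCond, PySem.Int.mod, PySem.Int.floordiv, hr, h1]
      · simp only [PySem.Int.mod, PySem.Int.floordiv] at hr h0 h1 h2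
        simp [pvCond, PySem.Int.mod, PySem.Int.floordiv, hr, h2]
      · simp only [PySem.Int.mod, PySem.Int.floordiv] at hr h0 h1 h2
        simp [pvCond, PySem.Int.mod, PySem.Int.floordiv, hr, h0, h1, h2]
      · simp only [PySem.Int.mod] at hr
        simp [pvCond, PySem.Int.mod, hr]

-- A's per-group test equals B's flag for group k
theorem pv_test_eq (Blatt : List Int) (k : Int) :
    (PySem.List.pyRange 0 8 1).foldl
      (fun test j =>
        if PySem.List.count [5 * k, 5 * k + 1, 5 * k + 2] (PySem.List.pyGetD Blatt j 0) > 0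
        then true else test)
      false
    = (PySem.List.pyRange 0 8 1).any
        (fun j => pvCond (PySem.List.pyGetD Blatt j 0) k) := by
  rw [pv_foldl_if_any (fun j => PySem.List.count [5 * k, 5 * k + 1, 5 * k + 2] (PySem.List.pyGetD Blatt j 0) > 0)]
  simp only [Bool.false_or]
  rw [Bool.eq_iff_iff]
  simp only [List.any_eq_true, decide_eq_true_eq, PySem.List.count_eq, gt_iff_lt,
    List.count_pos_iff, List.mem_cons, List.not_mem_nil, or_false]
  constructor
  · rintro ⟨j, hj, h⟩; exact ⟨j, hj, (pv_cond_iff _ _).mpr h⟩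
  · rintro ⟨j, hj, h⟩; exact ⟨j, hj, (pv_cond_iff _ _).mp h⟩

-- ===== VERDICT (by name: the statement is the Claim_ definition above) =====
theorem unterschiedlicheSpatzen_spec : Claim_equal_unterschiedlicheSpatzen := by
  intro Blatt _ _
  unfold Spec_unterschiedlicheSpatzen unterschiedlicheSpatzen unterschiedlicheSpatzen_alt
  rw [pv_fold_flags]
  have h3 : PySem.List.pyRange 0 3 1 = [0, 1, 2] := by decide
  rw [h3]
  simp only [pvAOuter, pv_test_eq, Bool.false_or]
  cases h0 : (PySem.List.pyRange 0 8 1).any (fun j => pvCond (PySem.List.pyGetD Blatt j 0) 0) <;>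
  cases h1 : (PySem.List.pyRange 0 8 1).any (fun j => pvCond (PySem.List.pyGetD Blatt j 0) 1) <;>
  cases h2 : (PySem.List.pyRange 0 8 1).any (fun j => pvCond (PySem.List.pyGetD Blatt j 0) 2) <;>
  simp
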